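-- pv_equiv track=rewrite | github.com/kenbockler/Andmeteaduse_masin-ppe_projekt | PROJEKT/K15/S195/2021-12-09-01-17-04/kodu3.py | bussif
-- ===== SOURCE A (Python) =====
-- def bussif(bussid):
--     sobivad = []
--     saabumine = '16:30'
--     lahkumine = '09:00'
--     hind = '5'
--     for buss in bussid:
--         sobib = True
--         if buss[2] <= hind:
--             hind = buss[2]
--             sobib = True
--         else:
--             sobib = False
--         if sobib:
--             sobivad.append(buss)
--     return sobivad
-- ===== SOURCE B (Python) =====
-- def bussif(bussid):
--     bussid = list(bussid)
--     # prefix-minimum table: prefix[i] = min of '5' and the first i prices (string order)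
--     prefix = ['5']
--     for buss in bussid:
--         prefix.append(min(prefix[-1], buss[2]))
--     # separate filter pass against the table
--     return [buss for buss, piir in zip(bussid, prefix) if buss[2] <= piir]
-- ===== Notes on version B (the rewrite author's own statement) =====
-- stated objective: alternative
-- what changed: A interleaves the running-minimum update with the append inside one stateful loop; B first builds a prefix-minimum table in one pass and then filters with a separate zip pass against that table.
import Mathlib
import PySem

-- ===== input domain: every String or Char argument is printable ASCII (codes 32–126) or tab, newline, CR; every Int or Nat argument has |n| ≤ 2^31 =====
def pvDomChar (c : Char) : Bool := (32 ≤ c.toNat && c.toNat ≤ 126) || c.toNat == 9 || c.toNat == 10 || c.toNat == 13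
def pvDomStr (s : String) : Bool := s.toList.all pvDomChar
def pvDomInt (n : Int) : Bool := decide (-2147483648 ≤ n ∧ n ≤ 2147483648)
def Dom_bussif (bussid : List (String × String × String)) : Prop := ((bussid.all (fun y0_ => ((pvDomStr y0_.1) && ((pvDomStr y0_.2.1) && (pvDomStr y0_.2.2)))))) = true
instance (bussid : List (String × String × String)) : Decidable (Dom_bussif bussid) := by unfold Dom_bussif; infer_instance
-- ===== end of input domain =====

-- B replaces A's single stateful loop (running minimum updated while appending) by a
-- prefix-minimum table built first, followed by a separate zip-filter pass (alternative decomposition).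

-- ===== PORT A =====
-- state = (sobivad, hind); per bus: keep and lower the threshold iff its price ≤ hind (string order)
def bussif (bussid : List (String × String × String)) : List (String × String × String) :=
  (bussid.foldl
    (fun (st : List (String × String × String) × String) buss =>
      if buss.2.2 ≤ st.2 then (st.1 ++ [buss], buss.2.2) else (st.1, st.2))
    (([] : List (String × String × String)), "5")).1

-- ===== PORT B =====
-- pass 1: prefix-minimum table seeded with "5"; pass 2: zip-filter against the table
def bussif_alt (bussid : List (String × String × String)) : List (String × String × String) :=
  let tabel := bussid.foldl (fun p buss => p ++ [min p.getLast! buss.2.2]) ["5"]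
  ((bussid.zip tabel).filter (fun bp => bp.1.2.2 ≤ bp.2)).map (·.1)

-- ===== PRECONDITION & SPEC =====
def Spec_bussif (bussid : List (String × String × String)) (out : List (String × String × String)) : Prop := out = bussif_alt bussid
instance (bussid : List (String × String × String)) (out : List (String × String × String)) : Decidable (Spec_bussif bussid out) := by unfold Spec_bussif; infer_instance

-- ===== CLAIM (what is proved, stated in full; the proofs are below) =====
def Claim_equal_bussif : Prop := ∀ (bussid : List (String × String × String)), Dom_bussif bussid → Spec_bussif bussid (bussif bussid)

-- ===== LEMMAS AND PROOFS =====

-- reference recursion both ports are reduced to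
def pvKeep (h : String) : List (String × String × String) → List (String × String × String)
  | [] => []
  | b :: bs => if b.2.2 ≤ h then b :: pvKeep b.2.2 bs else pvKeep h bs

-- prefix-minimum table as a recursion (what B's first pass builds)
def pvScanMin (h : String) : List (String × String × String) → List String
  | [] => [h]
  | b :: bs => h :: pvScanMin (min h b.2.2) bs

theorem pvFoldA_eq (l : List (String × String × String)) :
    ∀ (acc : List (String × String × String)) (h : String),
      (l.foldl
        (fun (st : List (String × String × String) × String) buss =>
          if buss.2.2 ≤ st.2 then (st.1 ++ [buss], buss.2.2) else (st.1, st.2))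
        (acc, h)).1 = acc ++ pvKeep h l := by
  induction l with
  | nil => intro acc h; simp [pvKeep]
  | cons b bs ih =>
    intro acc h
    by_cases hc : b.2.2 ≤ h
    · rw [List.foldl_cons, if_pos hc, ih, pvKeep, if_pos hc]; simp
    · rw [List.foldl_cons, if_neg hc, ih, pvKeep, if_neg hc]

theorem pvFoldB_eq (l : List (String × String × String)) :
    ∀ (acc : List String) (h : String),
      l.foldl (fun p buss => p ++ [min p.getLast! buss.2.2]) (acc ++ [h])
        = acc ++ pvScanMin h l := by
  induction l with
  | nil => intro acc h; simp [pvScanMin]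
  | cons b bs ih =>
    intro acc h
    have hlast : (acc ++ [h]).getLast! = h := by
      simp [List.getLast!_eq_getLast?_getD]
    rw [List.foldl_cons, hlast]
    rw [ih (acc ++ [h]) (min h b.2.2)]
    simp [pvScanMin]

theorem pvZipFilter_eq (l : List (String × String × String)) :
    ∀ (h : String),
      ((l.zip (pvScanMin h l)).filter (fun bp => bp.1.2.2 ≤ bp.2)).map (·.1)
        = pvKeep h l := by
  induction l with
  | nil => intro h; simp [pvScanMin, pvKeep]
  | cons b bs ih =>
    intro h
    by_cases hc : b.2.2 ≤ h
    · have hm : min h b.2.2 = b.2.2 := min_eq_right hc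
      rw [pvScanMin, List.zip_cons_cons, List.filter_cons_of_pos (by simpa using hc),
          List.map_cons, hm, ih, pvKeep, if_pos hc]
    · have hm : min h b.2.2 = h := min_eq_left (le_of_not_ge hc)
      rw [pvScanMin, List.zip_cons_cons, List.filter_cons_of_neg (by simpa using hc),
          hm, ih, pvKeep, if_neg hc]

-- ===== VERDICT (by name: the statement is the Claim_ definition above) =====
theorem bussif_spec : Claim_equal_bussif := by
  intro bussid _
  show bussif bussid = bussif_alt bussid
  unfold bussif bussif_alt
  rw [pvFoldA_eq bussid [] "5"]
  have hb : bussid.foldl (fun p buss => p ++ [min p.getLast! buss.2.2]) ["5"]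
      = pvScanMin "5" bussid := by
    have := pvFoldB_eq bussid [] "5"
    simpa using this
  simp only [hb, pvZipFilter_eq, List.nil_append]
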